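-- pv_equiv track=rewrite | github.com/ashleyrchen/EPIJudge | epi_judge_python/nearest_repeated_entries.py | really_textbook_inspired
-- ===== SOURCE A (Python) =====
-- import collections, math, functools
--
-- def really_textbook_inspired(paragraph):
-- # ------REALLY TEXTBOOK INSPIRED SOLUTION, O(n) time, O(d) space,
-- # where d is the number of distinct words
--     D, result = dict(), math.inf
--     if len(paragraph) >= 2:
--         for i, word in enumerate(paragraph):
--             if word in D:
--                 result = min(result, i-D[word])
--             D[word] = i
--     return result if result != math.inf else -1
-- ===== SOURCE B (Python) =====
-- def really_textbook_inspired(paragraph):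
--     # pass 1: group the indices of each word
--     groups = {}
--     for i, word in enumerate(paragraph):
--         groups.setdefault(word, []).append(i)
--     # pass 2: per group, min gap between consecutive occurrences; fold overall
--     best = None
--     for idxs in groups.values():
--         for a, b in zip(idxs, idxs[1:]):
--             d = b - a
--             if best is None or d < best:
--                 best = d
--     return -1 if best is None else best
-- ===== Notes on version B (the rewrite author's own statement) =====
-- stated objective: alternative
-- what changed: A's single pass keeping a last-index dict and updating a running min is replaced by two passes: first group all indices of each word into a dict of lists, then fold the minimum gap between consecutive indices of each group into the overall result.
import Mathlib
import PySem

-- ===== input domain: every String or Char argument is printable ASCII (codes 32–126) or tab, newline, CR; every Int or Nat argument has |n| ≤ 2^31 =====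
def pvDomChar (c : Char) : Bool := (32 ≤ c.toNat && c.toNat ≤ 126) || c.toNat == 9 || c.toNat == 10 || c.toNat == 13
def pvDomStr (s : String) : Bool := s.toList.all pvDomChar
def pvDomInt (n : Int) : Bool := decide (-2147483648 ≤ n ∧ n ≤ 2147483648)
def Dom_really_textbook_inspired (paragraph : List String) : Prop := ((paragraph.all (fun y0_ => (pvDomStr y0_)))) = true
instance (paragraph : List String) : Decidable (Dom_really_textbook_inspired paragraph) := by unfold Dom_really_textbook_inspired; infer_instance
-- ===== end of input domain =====

-- B replaces A's single pass with a last-index dict by a grouping pass (word -> index list)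
-- plus a per-group consecutive-gap pass (objective: alternative decomposition, same O(n) cost).


-- ===== PORT A =====
-- Python's math.inf sentinel for `result` is modelled as `none` (every other value
-- `result` takes is an int, and min(inf, d) = d), so the port is exact.
def aStep (st : PySem.Dict String Int × Option Int) (p : Int × String) :
    PySem.Dict String Int × Option Int :=
  match st.1.get? p.2 with
  | some j => (st.1.insert p.2 p.1,
      some (match st.2 with | none => p.1 - j | some r => min r (p.1 - j)))
  | none => (st.1.insert p.2 p.1, st.2)

def really_textbook_inspired (paragraph : List String) : Int :=
  let st :=
    if paragraph.length ≥ 2 then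
      (PySem.List.enumerate paragraph).foldl aStep (PySem.Dict.empty, none)
    else (PySem.Dict.empty, (none : Option Int))
  match st.2 with
  | some r => r
  | none => -1

-- ===== PORT B =====
-- groups.setdefault(word, []).append(i)  ==  groups[word] = groups.get(word, []) + [i]
def gStep (G : PySem.Dict String (List Int)) (p : Int × String) :
    PySem.Dict String (List Int) :=
  G.modify p.2 [] (fun l => l ++ [p.1])

-- `best` after the inner `if best is None or d < best` update
def minStep (best : Option Int) (d : Int) : Option Int :=
  match best with
  | none => some d
  | some b => if d < b then some d else some b

-- the inner loop: for a, b in zip(idxs, idxs[1:]): …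
def bBest (best : Option Int) (idxs : List Int) : Option Int :=
  (idxs.zip idxs.tail).foldl (fun acc p => minStep acc (p.2 - p.1)) best

def really_textbook_inspired_alt (paragraph : List String) : Int :=
  let groups := (PySem.List.enumerate paragraph).foldl gStep PySem.Dict.empty
  match groups.values.foldl bBest none with
  | none => -1
  | some b => b

-- ===== PRECONDITION & SPEC =====
def Spec_really_textbook_inspired (paragraph : List String) (out : Int) : Prop := out = really_textbook_inspired_alt paragraph
instance (paragraph : List String) (out : Int) : Decidable (Spec_really_textbook_inspired paragraph out) := by unfold Spec_really_textbook_inspired; infer_instance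

-- ===== CLAIM (what is proved, stated in full; the proofs are below) =====
def Claim_equal_really_textbook_inspired : Prop := ∀ (paragraph : List String), Dom_really_textbook_inspired paragraph → Spec_really_textbook_inspired paragraph (really_textbook_inspired paragraph)

-- ===== LEMMAS AND PROOFS =====

-- gaps between consecutive entries of one index list
def diffsOf (l : List Int) : List Int := (l.zip l.tail).map (fun p => p.2 - p.1)

-- all gaps recorded in a groups dict, in items order
def allDiffs (items : List (String × List Int)) : List Int :=
  items.flatMap (fun p => diffsOf p.2)

theorem bBest_eq_foldl_diffs (acc : Option Int) (l : List Int) :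
    bBest acc l = (diffsOf l).foldl minStep acc := by
  simp [bBest, diffsOf, List.foldl_map]

theorem foldl_bBest_eq (vs : List (List Int)) (acc : Option Int) :
    vs.foldl bBest acc = (vs.flatMap diffsOf).foldl minStep acc := by
  induction vs generalizing acc with
  | nil => rfl
  | cons v vs ih => simp [List.flatMap_cons, List.foldl_append, ih, bBest_eq_foldl_diffs]

theorem minStep_some (b y : Int) : minStep (some b) y = some (min y b) := by
  simp only [minStep, min_def]; split_ifs <;> simp <;> omega

theorem minStep_left_comm (a : Option Int) (y z : Int) :
    minStep (minStep a y) z = minStep (minStep a z) y := by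
  cases a with
  | none => simp only [minStep]; split_ifs <;> simp <;> omega
  | some b => simp [minStep_some, min_left_comm]

theorem foldl_minStep_push (L : List Int) (a : Option Int) (y : Int) :
    L.foldl minStep (minStep a y) = minStep (L.foldl minStep a) y := by
  induction L generalizing a with
  | nil => rfl
  | cons z L ih => rw [List.foldl_cons, minStep_left_comm]; exact ih _

theorem foldl_minStep_middle (L1 L2 : List Int) (y : Int) (a : Option Int) :
    (L1 ++ y :: L2).foldl minStep a = minStep ((L1 ++ L2).foldl minStep a) y := by
  simp only [List.foldl_append, List.foldl_cons, foldl_minStep_push]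

theorem diffsOf_cons_cons (x y : Int) (l : List Int) :
    diffsOf (x :: y :: l) = (y - x) :: diffsOf (y :: l) := by simp [diffsOf]

theorem diffsOf_snoc (l : List Int) (h : l ≠ []) (i : Int) :
    diffsOf (l ++ [i]) = diffsOf l ++ [i - l.getLast h] := by
  induction l with
  | nil => simp at h
  | cons x l ih =>
    cases l with
    | nil => simp [diffsOf]
    | cons y l =>
      have e : (x :: y :: l) ++ [i] = x :: y :: (l ++ [i]) := by simp
      rw [e, diffsOf_cons_cons, show y :: (l ++ [i]) = (y :: l) ++ [i] from rfl,
        ih (by simp), diffsOf_cons_cons]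
      simp [List.getLast_cons]

theorem min_eq_minStep (r : Option Int) (d : Int) :
    (some (match r with | none => d | some b => min b d) : Option Int) = minStep r d := by
  cases r with
  | none => rfl
  | some b => simp only [minStep, min_def]; split_ifs <;> simp <;> omega

-- splitting an association list with nodup keys at a contained key
theorem split_assoc (L : List (String × List Int)) (w : String)
    (hnd : (L.map Prod.fst).Nodup) (hc : L.any (fun p => p.1 == w) = true) :
    ∃ L1 l L2, L = L1 ++ (w, l) :: L2 ∧ (∀ p ∈ L1, p.1 ≠ w) ∧ (∀ p ∈ L2, p.1 ≠ w) := by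
  induction L with
  | nil => simp at hc
  | cons q L ih =>
    by_cases hq : q.1 = w
    · refine ⟨[], q.2, L, by simp [← hq], by simp, ?_⟩
      intro p hp hpw
      simp only [List.map_cons, List.nodup_cons] at hnd
      exact hnd.1 (by rw [hq, ← hpw]; exact List.mem_map_of_mem hp)
    · simp only [List.any_cons, Bool.or_eq_true, beq_iff_eq] at hc
      rcases hc with hc | hc
      · exact absurd hc hq
      · obtain ⟨L1, l, L2, h1, h2, h3⟩ := ih (by simp_all) hc
        exact ⟨q :: L1, l, L2, by simp [h1], by
          intro p hp; rcases List.mem_cons.1 hp with rfl | hp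
          · exact hq
          · exact h2 p hp, h3⟩

theorem find?_key_self (L1 L2 : List (String × List Int)) (w : String) (v : List Int)
    (h1 : ∀ p ∈ L1, p.1 ≠ w) :
    List.find? (fun p => p.1 == w) (L1 ++ (w, v) :: L2) = some (w, v) := by
  rw [List.find?_append]
  have : List.find? (fun p => p.1 == w) L1 = none := by
    rw [List.find?_eq_none]; intro p hp; simpa using h1 p hp
  simp [this]

theorem find?_key_middle (L1 L2 : List (String × List Int)) (w w' : String)
    (v : List Int) (hne : w' ≠ w) :
    List.find? (fun p => p.1 == w') (L1 ++ (w, v) :: L2)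
      = List.find? (fun p => p.1 == w') (L1 ++ L2) := by
  rw [List.find?_append, List.find?_append, List.find?_cons]
  have : ((w, v).1 == w') = false := by simpa using (fun h => hne h.symm)
  simp [this]

theorem map_replace (L1 L2 : List (String × List Int)) (w : String) (l v : List Int)
    (h1 : ∀ p ∈ L1, p.1 ≠ w) (h2 : ∀ p ∈ L2, p.1 ≠ w) :
    (L1 ++ (w, l) :: L2).map (fun p => if p.1 == w then (w, v) else p)
      = L1 ++ (w, v) :: L2 := by
  rw [List.map_append, List.map_cons]
  have e1 : L1.map (fun p => if p.1 == w then (w, v) else p) = L1.map id :=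
    List.map_congr_left (fun p hp => by simp [h1 p hp])
  have e2 : L2.map (fun p => if p.1 == w then (w, v) else p) = L2.map id :=
    List.map_congr_left (fun p hp => by simp [h2 p hp])
  rw [e1, e2]; simp

-- the main invariant: A's running (last-index dict, best) against B's groups-so-far
theorem main_inv (ps : List (Int × String)) :
    ∀ (G : PySem.Dict String (List Int)) (D : PySem.Dict String Int) (r : Option Int),
    (G.items.map Prod.fst).Nodup →
    (∀ p ∈ G.items, p.2 ≠ []) →
    (∀ w, D.get? w = (G.getD w []).getLast?) →
    r = (allDiffs G.items).foldl minStep none →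
    (ps.foldl aStep (D, r)).2 = (allDiffs (ps.foldl gStep G).items).foldl minStep none := by
  induction ps with
  | nil => intro G D r _ _ _ hr; simpa using hr
  | cons p ps ih =>
    rcases p with ⟨i, w⟩
    intro G D r hnd hne hDG hr
    simp only [List.foldl_cons]
    by_cases hc : G.contains w = true
    · -- w already grouped: A records the gap to the last occurrence
      obtain ⟨L1, l, L2, hsplit, hL1, hL2⟩ :=
        split_assoc G.items w hnd (by simpa [PySem.Dict.contains] using hc)
      have hget : G.get? w = some l := by
        simp [PySem.Dict.get?, hsplit, find?_key_self L1 L2 w l hL1]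
      have hlne : l ≠ [] := hne (w, l) (by rw [hsplit]; simp)
      have hgetD : G.getD w [] = l := by simp [PySem.Dict.getD, hget]
      have hDw : D.get? w = some (l.getLast hlne) := by
        rw [hDG w, hgetD, List.getLast?_eq_some_getLast hlne]
      have hstepA : aStep (D, r) (i, w)
          = (D.insert w i, minStep r (i - l.getLast hlne)) := by
        simp only [aStep, hDw]; rw [min_eq_minStep]
      have hstepG : gStep G (i, w) = G.insert w (l ++ [i]) := by
        simp [gStep, PySem.Dict.modify, hgetD]
      have hIns : (G.insert w (l ++ [i])).items = L1 ++ (w, l ++ [i]) :: L2 := by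
        simp only [PySem.Dict.insert, hc, if_true, hsplit]
        exact map_replace L1 L2 w l (l ++ [i]) hL1 hL2
      rw [hstepA, hstepG]
      apply ih
      · rw [hIns]
        have : (L1 ++ (w, l ++ [i]) :: L2).map Prod.fst
            = (L1 ++ (w, l) :: L2).map Prod.fst := by simp
        rw [this, ← hsplit]; exact hnd
      · rw [hIns]
        intro p hp
        rcases List.mem_append.1 hp with hp | hp
        · exact hne p (by rw [hsplit]; exact List.mem_append.2 (Or.inl hp))
        · rcases List.mem_cons.1 hp with rfl | hp
          · simp
          · exact hne p (by rw [hsplit]; simp [hp])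
      · intro w'
        by_cases hw : w' = w
        · subst hw
          rw [PySem.Dict.get?_insert_self]
          have : (G.insert w' (l ++ [i])).getD w' [] = l ++ [i] := by
            simp [PySem.Dict.getD, PySem.Dict.get?, hIns, find?_key_self L1 L2 w' _ hL1]
          rw [this, List.getLast?_concat]
        · rw [PySem.Dict.get?_insert_of_ne D i hw, hDG w']
          have e : (G.insert w (l ++ [i])).get? w' = G.get? w' := by
            simp only [PySem.Dict.get?, hIns, hsplit, find?_key_middle L1 L2 w w' _ hw]
          simp only [PySem.Dict.getD, e]
      · rw [hIns]
        have ediff : allDiffs (L1 ++ (w, l ++ [i]) :: L2)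
            = (allDiffs L1 ++ diffsOf l) ++ (i - l.getLast hlne) :: allDiffs L2 := by
          simp [allDiffs, diffsOf_snoc l hlne i]
        rw [ediff, foldl_minStep_middle, hr, hsplit]
        have : allDiffs (L1 ++ (w, l) :: L2) = allDiffs L1 ++ diffsOf l ++ allDiffs L2 := by
          simp [allDiffs]
        rw [this, List.append_assoc]
    · -- first occurrence of w: A only records it, B opens a singleton group
      simp only [PySem.Dict.contains, List.any_eq_true, not_exists, not_and] at hc
      have hfind : List.find? (fun p => p.1 == w) G.items = none := by
        rw [List.find?_eq_none]; intro p hp; simpa using hc p hp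
      have hget : G.get? w = none := by simp [PySem.Dict.get?, hfind]
      have hgetD : G.getD w [] = [] := by simp [PySem.Dict.getD, hget]
      have hDw : D.get? w = none := by rw [hDG w, hgetD]; rfl
      have hstepA : aStep (D, r) (i, w) = (D.insert w i, r) := by
        simp only [aStep, hDw]
      have hstepG : gStep G (i, w) = G.insert w [i] := by
        simp [gStep, PySem.Dict.modify, hgetD]
      have hIns : (G.insert w [i]).items = G.items ++ [(w, [i])] := by
        have hcf : G.contains w = false := by
          simp only [PySem.Dict.contains, List.any_eq_false]
          intro p hp; simpa using hc p hp
        simp [PySem.Dict.insert, hcf]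
      rw [hstepA, hstepG]
      apply ih
      · rw [hIns, List.map_append]
        simp only [List.map_cons, List.map_nil]
        rw [List.nodup_append]
        refine ⟨hnd, by simp, ?_⟩
        intro a ha b hb
        simp only [List.mem_singleton] at hb
        subst hb
        obtain ⟨p, hp, hpw⟩ := List.mem_map.1 ha
        intro heq
        exact hc p hp (by simp [hpw, heq])
      · rw [hIns]
        intro p hp
        rcases List.mem_append.1 hp with hp | hp
        · exact hne p hp
        · rcases List.mem_cons.1 hp with rfl | hp
          · simp
          · simp at hp
      · intro w'
        by_cases hw : w' = w
        · subst hw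
          rw [PySem.Dict.get?_insert_self]
          have : (G.insert w' [i]).getD w' [] = [i] := by
            simp [PySem.Dict.getD, PySem.Dict.get?, hIns, List.find?_append, hfind]
          rw [this]; rfl
        · rw [PySem.Dict.get?_insert_of_ne D i hw, hDG w']
          have : (G.insert w [i]).get? w' = G.get? w' := by
            simp only [PySem.Dict.get?, hIns, List.find?_append]
            have hone : List.find? (fun p => p.1 == w') [(w, [i])] = none := by
              rw [List.find?_eq_none]
              intro p hp
              simp only [List.mem_singleton] at hp
              subst hp
              simpa using fun h : w = w' => hw h.symm
            rw [hone]; simp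
          simp only [PySem.Dict.getD, this]
      · rw [hIns, hr]
        simp [allDiffs, diffsOf]

-- A's and B's final folds agree starting from the empty state
theorem fold_eq (paragraph : List String) :
    ((PySem.List.enumerate paragraph).foldl aStep (PySem.Dict.empty, none)).2
      = (((PySem.List.enumerate paragraph).foldl gStep PySem.Dict.empty).values.foldl bBest none) := by
  rw [foldl_bBest_eq]
  have : (((PySem.List.enumerate paragraph).foldl gStep PySem.Dict.empty).values).flatMap diffsOf
      = allDiffs ((PySem.List.enumerate paragraph).foldl gStep PySem.Dict.empty).items := by
    simp [PySem.Dict.values, allDiffs, List.flatMap_map]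
  rw [this]
  exact main_inv _ PySem.Dict.empty PySem.Dict.empty none (by simp [PySem.Dict.empty])
    (by simp [PySem.Dict.empty]) (fun w => by simp [PySem.Dict.empty, PySem.Dict.get?, PySem.Dict.getD])
    (by simp [PySem.Dict.empty, allDiffs])

-- ===== VERDICT (by name: the statement is the Claim_ definition above) =====
theorem really_textbook_inspired_spec : Claim_equal_really_textbook_inspired := by
  unfold Claim_equal_really_textbook_inspired
  intro paragraph _
  unfold Spec_really_textbook_inspired really_textbook_inspired really_textbook_inspired_alt
  by_cases hlen : paragraph.length ≥ 2
  · simp only [hlen, if_true, fold_eq]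
    cases (((PySem.List.enumerate paragraph).foldl gStep PySem.Dict.empty).values.foldl bBest none) <;> rfl
  · match paragraph, hlen with
    | [], _ => rfl
    | [x], _ => simp [gStep, bBest, PySem.Dict.modify, PySem.Dict.getD, PySem.Dict.get?,
        PySem.Dict.empty, PySem.Dict.insert, PySem.Dict.contains, PySem.Dict.values,
        PySem.List.enumerate]
    | x :: y :: t, h => exact absurd (by simp only [List.length_cons]; omega) h
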